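-- pv_equiv track=rewrite | github.com/valvoda/holjplus | format.py | pretty_head
-- ===== SOURCE A (Python) =====
-- def pretty_head(sentences):
--     """
--     Removes the headnote at the begining of a case
--     """
--     clean = []
--     start = False
--     for sent in sentences:
--         judge = sent.split(" ")[0] #first word of a sentence
--
--         if judge == "LORD" or judge == "LADY" or judge == "BARONESS": #NOTE might need more options for Lady Hale?
--             start = True # flag to indicate start of the body proper
--             clean.append("\n-------------NEW JUDGE---------------") # marking of a new judge
--             clean.append(sent)
--
--         elif start == True and sent != "": # remove empty sentences
--             clean.append(sent)
--
--     return clean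
-- ===== SOURCE B (Python) =====
-- JUDGES = {"LORD", "LADY", "BARONESS"}
--
-- def _is_judge(sent):
--     return sent.split(" ")[0] in JUDGES
--
-- def pretty_head(sentences):
--     # phase 1: find the start of the body (first sentence opening with a judge marker)
--     i = 0
--     n = len(sentences)
--     while i < n and not _is_judge(sentences[i]):
--         i += 1
--     # phase 2: format only the body; no state flag needed
--     out = []
--     for sent in sentences[i:]:
--         if _is_judge(sent):
--             out.append("\n-------------NEW JUDGE---------------")
--             out.append(sent)
--         elif sent != "":
--             out.append(sent)
--     return out
-- ===== Notes on version B (the rewrite author's own statement) =====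
-- stated objective: simpler
-- what changed: Replaces the single stateful loop with a boolean 'start' flag by two phases: a linear search (dropwhile) for the first judge-marker sentence, then a flagless formatting pass over that tail only.
import Mathlib
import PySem

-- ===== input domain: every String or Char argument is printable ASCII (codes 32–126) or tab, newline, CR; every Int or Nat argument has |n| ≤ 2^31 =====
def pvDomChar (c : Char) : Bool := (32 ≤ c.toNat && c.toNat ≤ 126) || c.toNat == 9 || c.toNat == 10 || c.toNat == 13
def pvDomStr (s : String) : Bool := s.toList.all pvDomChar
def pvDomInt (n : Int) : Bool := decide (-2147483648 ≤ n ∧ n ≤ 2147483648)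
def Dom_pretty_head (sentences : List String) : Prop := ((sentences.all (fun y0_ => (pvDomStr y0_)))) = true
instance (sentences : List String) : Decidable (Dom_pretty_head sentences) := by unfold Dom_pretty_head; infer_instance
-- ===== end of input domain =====

-- B splits A's one stateful loop (boolean 'start' flag) into a dropWhile search for the
-- first judge sentence followed by a flagless formatting pass over the tail; same values.

-- ===== PORT A =====
-- sent.split(" ")[0]; split on a nonempty separator is never [], so headD "" is exact
def pvStepA (st : List String × Bool) (sent : String) : List String × Bool :=
  let judge := (((PySem.Str.split? sent " ").getD [])).headD ""
  if judge = "LORD" ∨ judge = "LADY" ∨ judge = "BARONESS" then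
    (st.1 ++ ["\n-------------NEW JUDGE---------------", sent], true)
  else if st.2 = true ∧ sent ≠ "" then
    (st.1 ++ [sent], st.2)
  else st

def pretty_head (sentences : List String) : List String :=
  (sentences.foldl pvStepA ([], false)).1

-- ===== PORT B =====
def pvIsJudge (sent : String) : Bool :=
  (["LORD", "LADY", "BARONESS"] : List String).contains ((((PySem.Str.split? sent " ").getD [])).headD "")

def pvStepB (out : List String) (sent : String) : List String :=
  if pvIsJudge sent then out ++ ["\n-------------NEW JUDGE---------------", sent]
  else if sent ≠ "" then out ++ [sent]
  else out

def pretty_head_alt (sentences : List String) : List String :=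
  (sentences.dropWhile (fun s => !pvIsJudge s)).foldl pvStepB []

-- ===== PRECONDITION & SPEC =====
def Spec_pretty_head (sentences : List String) (out : List String) : Prop := out = pretty_head_alt sentences
instance (sentences : List String) (out : List String) : Decidable (Spec_pretty_head sentences out) := by unfold Spec_pretty_head; infer_instance

-- ===== CLAIM (what is proved, stated in full; the proofs are below) =====
def Claim_equal_pretty_head : Prop := ∀ (sentences : List String), Dom_pretty_head sentences → Spec_pretty_head sentences (pretty_head sentences)

-- ===== LEMMAS AND PROOFS =====

theorem pvIsJudge_iff (sent : String) :
    pvIsJudge sent = true ↔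
      ((((PySem.Str.split? sent " ").getD [])).headD "" = "LORD" ∨
       (((PySem.Str.split? sent " ").getD [])).headD "" = "LADY" ∨
       (((PySem.Str.split? sent " ").getD [])).headD "" = "BARONESS") := by
  unfold pvIsJudge
  simp only [List.contains_cons, List.contains_nil, Bool.or_eq_true, beq_iff_eq,
    Bool.false_eq_true, or_false]

theorem pvFoldB_acc (l : List String) : ∀ out : List String,
    l.foldl pvStepB out = out ++ l.foldl pvStepB [] := by
  induction l with
  | nil => simp
  | cons h t ih =>
    intro out
    simp only [List.foldl_cons]
    rw [ih (pvStepB out h), ih (pvStepB [] h)]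
    unfold pvStepB
    split_ifs <;> simp

theorem pvFoldA_true (l : List String) : ∀ acc : List String,
    (l.foldl pvStepA (acc, true)).1 = acc ++ l.foldl pvStepB [] := by
  induction l with
  | nil => simp
  | cons h t ih =>
    intro acc
    simp only [List.foldl_cons]
    by_cases hj : pvIsJudge h = true
    · have hj' := (pvIsJudge_iff h).1 hj
      simp only [List.headD_eq_head?_getD] at hj'
      rw [show pvStepA (acc, true) h
            = (acc ++ ["\n-------------NEW JUDGE---------------", h], true) by
          rcases hj' with h1 | h1 | h1 <;> simp [pvStepA, h1]]
      rw [ih, show pvStepB [] h = ["\n-------------NEW JUDGE---------------", h] by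
          simp [pvStepB, hj]]
      rw [pvFoldB_acc t ["\n-------------NEW JUDGE---------------", h]]
      simp
    · have hj' : ¬ ((((PySem.Str.split? h " ").getD [])).headD "" = "LORD" ∨
          (((PySem.Str.split? h " ").getD [])).headD "" = "LADY" ∨
          (((PySem.Str.split? h " ").getD [])).headD "" = "BARONESS") := by
        intro hc; exact hj ((pvIsJudge_iff h).2 hc)
      push Not at hj'
      simp only [List.headD_eq_head?_getD] at hj'
      have hjf : pvIsJudge h = false := by simpa using hj
      by_cases he : h = ""
      · subst he
        rw [show pvStepA (acc, true) "" = (acc, true) by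
            simp [pvStepA, hj'.1, hj'.2.1, hj'.2.2]]
        rw [ih, show pvStepB [] "" = [] by simp [pvStepB, hjf]]
      · rw [show pvStepA (acc, true) h = (acc ++ [h], true) by
            simp [pvStepA, hj'.1, hj'.2.1, hj'.2.2, he]]
        rw [ih, show pvStepB [] h = [h] by simp [pvStepB, hjf, he]]
        rw [pvFoldB_acc t [h]]
        simp

theorem pvFoldA_false (l : List String) : ∀ acc : List String,
    (l.foldl pvStepA (acc, false)).1
      = acc ++ (l.dropWhile (fun s => !pvIsJudge s)).foldl pvStepB [] := by
  induction l with
  | nil => simp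
  | cons h t ih =>
    intro acc
    simp only [List.foldl_cons]
    by_cases hj : pvIsJudge h = true
    · have hj' := (pvIsJudge_iff h).1 hj
      simp only [List.headD_eq_head?_getD] at hj'
      rw [show pvStepA (acc, false) h
            = (acc ++ ["\n-------------NEW JUDGE---------------", h], true) by
          rcases hj' with h1 | h1 | h1 <;> simp [pvStepA, h1]]
      rw [List.dropWhile_cons_of_neg (by simp [hj])]
      simp only [List.foldl_cons]
      rw [pvFoldA_true t, show pvStepB [] h = ["\n-------------NEW JUDGE---------------", h] by
          simp [pvStepB, hj]]
      rw [pvFoldB_acc t ["\n-------------NEW JUDGE---------------", h]]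
      simp
    · have hj' : ¬ ((((PySem.Str.split? h " ").getD [])).headD "" = "LORD" ∨
          (((PySem.Str.split? h " ").getD [])).headD "" = "LADY" ∨
          (((PySem.Str.split? h " ").getD [])).headD "" = "BARONESS") := by
        intro hc; exact hj ((pvIsJudge_iff h).2 hc)
      push Not at hj'
      simp only [List.headD_eq_head?_getD] at hj'
      rw [show pvStepA (acc, false) h = (acc, false) by
          simp [pvStepA, hj'.1, hj'.2.1, hj'.2.2]]
      rw [List.dropWhile_cons_of_pos (by simp [hj])]
      exact ih acc

-- ===== VERDICT (by name: the statement is the Claim_ definition above) =====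
theorem pretty_head_spec : Claim_equal_pretty_head := by
  intro sentences _
  unfold Spec_pretty_head pretty_head pretty_head_alt
  simpa using pvFoldA_false sentences []
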